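-- pv_equiv track=rewrite | github.com/AlexAnys/AlexAnys | scripts/update_star_history.py | _find_milestones
-- ===== SOURCE A (Python) =====
-- def _find_milestones(dates, totals):
--     """Find dates when star milestones were crossed."""
--     milestones = []
--     for target in [500, 1000, 2000, 3000]:
--         if target > totals[-1]:
--             break
--         for i, t in enumerate(totals):
--             if t >= target:
--                 milestones.append((dates[i], target))
--                 break
--     return milestones
-- ===== SOURCE B (Python) =====
-- def _find_milestones(dates, totals):
--     """Single forward scan: resume from the previous crossing instead of rescanning per target."""
--     last = totals[-1]
--     milestones = []
--     n = len(totals)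
--     i = 0
--     for target in (500, 1000, 2000, 3000):
--         if target > last:
--             break
--         while i < n and totals[i] < target:
--             i += 1
--         milestones.append((dates[i], target))
--     return milestones
-- ===== Notes on version B (the rewrite author's own statement) =====
-- stated objective: alternative
-- what changed: A rescans totals from index 0 for every milestone target; B makes a single forward scan whose pointer resumes from the previous crossing, which is correct because first-crossing indices are nondecreasing in the target.
import Mathlib
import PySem

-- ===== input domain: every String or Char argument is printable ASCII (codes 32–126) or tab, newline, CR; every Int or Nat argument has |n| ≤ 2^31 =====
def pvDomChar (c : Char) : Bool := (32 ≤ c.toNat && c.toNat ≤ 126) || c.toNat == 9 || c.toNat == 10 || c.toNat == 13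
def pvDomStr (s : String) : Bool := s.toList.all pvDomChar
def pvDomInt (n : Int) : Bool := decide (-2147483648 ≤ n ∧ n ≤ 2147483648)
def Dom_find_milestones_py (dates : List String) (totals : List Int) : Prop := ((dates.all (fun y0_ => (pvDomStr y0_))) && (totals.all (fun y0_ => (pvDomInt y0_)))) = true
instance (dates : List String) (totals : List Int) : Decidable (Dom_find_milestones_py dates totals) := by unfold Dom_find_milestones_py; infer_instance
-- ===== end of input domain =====

-- B replaces A's per-target rescans of `totals` by one forward scan whose pointer resumes
-- from the previous crossing (alternative decomposition; same results).

-- ===== PORT A =====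
-- inner 'for i, t in enumerate(totals): if t >= target: append; break'
def pvInnerA (dates : List String) (target : Int) : List (Int × Int) → List (String × Int)
  | [] => []
  | (i, t) :: rest =>
    if t ≥ target then [((PySem.List.pyGet? dates i).getD "", target)]
    else pvInnerA dates target rest

-- outer 'for target in [500,1000,2000,3000]' with break on 'target > totals[-1]'
def pvOuterA (dates : List String) (totals : List Int) : List Int → List (String × Int) → List (String × Int)
  | [], acc => acc
  | target :: rest, acc =>
    if target > (PySem.List.pyGet? totals (-1)).getD 0 then acc
    else pvOuterA dates totals rest (acc ++ pvInnerA dates target (PySem.List.enumerate totals 0))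

def find_milestones_py (dates : List String) (totals : List Int) : List (String × Int) :=
  pvOuterA dates totals [500, 1000, 2000, 3000] []

-- ===== PORT B =====
-- 'while i < n and totals[i] < target: i += 1'
def pvAdvance (totals : List Int) (n : Nat) (target : Int) (i : Nat) : Nat :=
  if h : i < n ∧ (PySem.List.pyGet? totals (i : Int)).getD 0 < target then
    pvAdvance totals n target (i + 1)
  else i
termination_by n - i
decreasing_by omega

def pvOuterB (dates : List String) (totals : List Int) (n : Nat) (last : Int) :
    List Int → Nat → List (String × Int) → List (String × Int)
  | [], _, acc => acc
  | target :: rest, i, acc =>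
    if target > last then acc
    else
      let j := pvAdvance totals n target i
      pvOuterB dates totals n last rest j
        (acc ++ [((PySem.List.pyGet? dates (j : Int)).getD "", target)])

def find_milestones_py_alt (dates : List String) (totals : List Int) : List (String × Int) :=
  pvOuterB dates totals totals.length ((PySem.List.pyGet? totals (-1)).getD 0)
    [500, 1000, 2000, 3000] 0 []

-- ===== PRECONDITION & SPEC =====
-- Pre_ excludes exactly the inputs where Python A raises: empty `totals` (IndexError on
-- totals[-1]) and inputs where a reached milestone's first crossing index is out of range
-- for `dates` (IndexError on dates[i]); Python B raises on exactly the same inputs.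
def Pre_find_milestones_py (dates : List String) (totals : List Int) : Prop :=
  totals ≠ [] ∧ ∀ t ∈ ([500, 1000, 2000, 3000] : List Int),
    t ≤ totals.getLastD 0 → totals.findIdx (fun v => t ≤ v) < dates.length
instance (dates : List String) (totals : List Int) : Decidable (Pre_find_milestones_py dates totals) := by unfold Pre_find_milestones_py; infer_instance

def pvWitness_find_milestones_py : List String × List Int := (["a", "b"], [600, 700])

def Spec_find_milestones_py (dates : List String) (totals : List Int) (out : List (String × Int)) : Prop := out = find_milestones_py_alt dates totals
instance (dates : List String) (totals : List Int) (out : List (String × Int)) : Decidable (Spec_find_milestones_py dates totals out) := by unfold Spec_find_milestones_py; infer_instance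

-- ===== CLAIM (what is proved, stated in full; the proofs are below) =====
def Claim_equal_find_milestones_py : Prop := ∀ (dates : List String) (totals : List Int), Dom_find_milestones_py dates totals → Pre_find_milestones_py dates totals → Spec_find_milestones_py dates totals (find_milestones_py dates totals)

-- ===== LEMMAS AND PROOFS =====

-- A's inner scan over enumerate equals a findIdx lookup
lemma pvInnerA_eq (dates : List String) (target : Int) :
    ∀ (ts : List Int) (s : Int),
      pvInnerA dates target (PySem.List.enumerate ts s) =
        if ts.findIdx (fun v => target ≤ v) < ts.length then
          [((PySem.List.pyGet? dates (s + (ts.findIdx (fun v => target ≤ v) : Int))).getD "", target)]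
        else []
  | [], s => by simp [pvInnerA, PySem.List.enumerate_nil]
  | t :: rest, s => by
      rw [PySem.List.enumerate_cons]
      by_cases h : target ≤ t
      · simp [pvInnerA, h, List.findIdx_cons]
      · have hlt : ¬ (t ≥ target) := h
        simp only [pvInnerA, if_neg hlt, pvInnerA_eq dates target rest (s + 1),
          List.findIdx_cons]
        have : (decide (target ≤ t)) = false := by simp [h]
        rw [this]
        simp only [cond_false, List.length_cons]
        by_cases h2 : rest.findIdx (fun v => target ≤ v) < rest.length
        · rw [if_pos h2, if_pos (by omega)]
          have harg : (s + ((rest.findIdx (fun v => decide (target ≤ v)) + 1 : Nat) : Int)) =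
              s + 1 + ((rest.findIdx (fun v => decide (target ≤ v)) : Nat) : Int) := by
            push_cast; ring
          rw [harg]
        · rw [if_neg h2, if_neg (by omega)]

-- the resumable while-loop finds the global first crossing, given the pointer has not passed it
lemma pvAdvance_eq (totals : List Int) (target : Int) :
    ∀ (d i : Nat), i ≤ totals.findIdx (fun v => target ≤ v) →
      totals.findIdx (fun v => target ≤ v) - i = d →
      pvAdvance totals totals.length target i = totals.findIdx (fun v => target ≤ v) := by
  intro d
  induction d with
  | zero =>
      intro i hle hd
      have hie : i = totals.findIdx (fun v => target ≤ v) := by omega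
      subst hie
      rw [pvAdvance]
      rw [dif_neg]
      intro ⟨h1, h2⟩
      have hget := List.findIdx_getElem (p := fun v => target ≤ v) (xs := totals) (w := h1)
      rw [PySem.List.pyGet?_natCast] at h2
      rw [List.getElem?_eq_getElem h1] at h2
      simp only [Option.getD_some] at h2
      simp at hget
      omega
  | succ d ih =>
      intro i hle hd
      have hi : i < totals.findIdx (fun v => target ≤ v) := by omega
      have hlen : totals.findIdx (fun v => target ≤ v) ≤ totals.length := List.findIdx_le_length
      have hilen : i < totals.length := by omega
      have hnot := List.not_of_lt_findIdx hi
      rw [pvAdvance]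
      rw [dif_pos]
      · exact ih (i + 1) (by omega) (by omega)
      · constructor
        · exact hilen
        · rw [PySem.List.pyGet?_natCast, List.getElem?_eq_getElem hilen]
          simpa using hnot

-- first crossing index is monotone in the target
lemma pvFindIdx_mono (totals : List Int) {t t' : Int} (h : t ≤ t') :
    totals.findIdx (fun v => t ≤ v) ≤ totals.findIdx (fun v => t' ≤ v) := by
  by_contra hc
  rw [Nat.not_le] at hc
  have hlen : totals.findIdx (fun v => t' ≤ v) < totals.length :=
    lt_of_lt_of_le hc List.findIdx_le_length
  have hget := List.findIdx_getElem (p := fun v => t' ≤ v) (xs := totals) (w := hlen)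
  have hnot := List.not_of_lt_findIdx hc
  simp only [decide_eq_true_eq] at hget
  simp only [decide_eq_false_iff_not, not_le] at hnot
  omega

-- a target not above the last element is crossed somewhere
lemma pvFindIdx_lt_length (totals : List Int) (hne : totals ≠ []) {t : Int}
    (h : t ≤ totals.getLast hne) :
    totals.findIdx (fun v => t ≤ v) < totals.length := by
  rw [List.findIdx_lt_length]
  exact ⟨totals.getLast hne, List.getLast_mem hne, by simpa using h⟩

-- main loop correspondence
lemma pvOuter_eq (dates : List String) (totals : List Int) (hne : totals ≠ []) :
    ∀ (ms : List Int) (i : Nat) (acc : List (String × Int)),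
      (∀ t ∈ ms, i ≤ totals.findIdx (fun v => t ≤ v)) →
      List.Pairwise (· ≤ ·) ms →
      pvOuterA dates totals ms acc =
        pvOuterB dates totals totals.length ((PySem.List.pyGet? totals (-1)).getD 0) ms i acc := by
  intro ms
  induction ms with
  | nil => intro i acc _ _; rfl
  | cons target rest ih =>
      intro i acc hinv hpw
      simp only [pvOuterA, pvOuterB]
      by_cases hbr : target > (PySem.List.pyGet? totals (-1)).getD 0
      · rw [if_pos hbr, if_pos hbr]
      · rw [if_neg hbr, if_neg hbr]
        have hlast : (PySem.List.pyGet? totals (-1)).getD 0 = totals.getLast hne := by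
          rw [PySem.List.pyGet?_neg_one, List.getLast?_eq_getLast_of_ne_nil hne]
          rfl
        have hcross : totals.findIdx (fun v => target ≤ v) < totals.length := by
          apply pvFindIdx_lt_length totals hne
          rw [← hlast]; omega
        have hadv : pvAdvance totals totals.length target i =
            totals.findIdx (fun v => target ≤ v) :=
          pvAdvance_eq totals target _ i (hinv target (by simp)) rfl
        rw [pvInnerA_eq, if_pos hcross]
        simp only [zero_add, hadv]
        apply ih
        · intro t ht
          exact pvFindIdx_mono totals ((List.pairwise_cons.mp hpw).1 t ht)
        · exact (List.pairwise_cons.mp hpw).2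

-- ===== VERDICT (by name: the statement is the Claim_ definition above) =====
theorem find_milestones_py_spec : Claim_equal_find_milestones_py := by
  intro dates totals _ hpre
  unfold Spec_find_milestones_py find_milestones_py find_milestones_py_alt
  exact pvOuter_eq dates totals hpre.1 [500, 1000, 2000, 3000] 0 []
    (fun t _ => Nat.zero_le _) (by decide)
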